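-- pv_equiv track=rewrite | github.com/jinlee487/Algorithm | src/algoexpert/hard/SameBsts/solution.py | sameBstsHelper
-- ===== SOURCE A (Python) =====
-- def sameBstsHelper(arrayOne, arrayTwo, rootIdxOne, rootIdxTwo, minVal, maxVal):
-- 	if rootIdxOne == -1 or rootIdxTwo == -1:
-- 		return rootIdxOne == rootIdxTwo
-- 	if arrayOne[rootIdxOne] != arrayTwo[rootIdxTwo]:
-- 		return False
-- 	leftRootIdxOne = getIdxOfFirstSmaller(arrayOne, rootIdxOne, minVal)
-- 	leftRootIdxTwo = getIdxOfFirstSmaller(arrayTwo, rootIdxTwo, minVal)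
-- 	rightRootIdxOne = getIdxOfBiggerOrEqual(arrayOne, rootIdxOne, maxVal)
-- 	rightRootIdxTwo = getIdxOfBiggerOrEqual(arrayTwo, rootIdxTwo, maxVal)
--
-- 	currentValue = arrayOne[rootIdxOne]
-- 	leftAreSame = sameBstsHelper(arrayOne, arrayTwo, leftRootIdxOne, leftRootIdxTwo, minVal, currentValue)
-- 	rightAreSame = sameBstsHelper(arrayOne, arrayTwo, rightRootIdxOne, rightRootIdxTwo, currentValue, maxVal)
-- 	return leftAreSame and rightAreSame
--
-- def getIdxOfFirstSmaller(array, rootIdx, minVal):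
-- 	for i in range(rootIdx+1,len(array)):
-- 		if array[i] < array[rootIdx] and array[i] >= minVal:
-- 			return i
-- 	return -1
--
-- def getIdxOfBiggerOrEqual(array,rootIdx, maxVal):
-- 	for i in range(rootIdx+1,len(array)):
-- 		if array[rootIdx] <= array[i] and array[i] < maxVal:
-- 			return i
-- 	return -1
-- ===== SOURCE B (Python) =====
-- def sameBstsHelper(arrayOne, arrayTwo, rootIdxOne, rootIdxTwo, minVal, maxVal):
--     if rootIdxOne == -1 or rootIdxTwo == -1:
--         return rootIdxOne == rootIdxTwo
--     return sameSubtrees(arrayOne[rootIdxOne], arrayOne[rootIdxOne + 1:],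
--                         arrayTwo[rootIdxTwo], arrayTwo[rootIdxTwo + 1:],
--                         minVal, maxVal)
--
-- def sameSubtrees(root1, rest1, root2, rest2, minVal, maxVal):
--     # compare the two subtrees directly on value lists: the left (resp. right)
--     # subtree of a root is encoded by the subsequence of later values in
--     # [minVal, root) (resp. [root, maxVal)); recurse on those subsequences.
--     if root1 != root2:
--         return False
--     left1 = [v for v in rest1 if minVal <= v < root1]
--     left2 = [v for v in rest2 if minVal <= v < root2]
--     right1 = [v for v in rest1 if root1 <= v < maxVal]
--     right2 = [v for v in rest2 if root2 <= v < maxVal]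
--     if bool(left1) != bool(left2) or bool(right1) != bool(right2):
--         return False
--     leftSame = (not left1) or sameSubtrees(left1[0], left1[1:], left2[0], left2[1:], minVal, root1)
--     rightSame = (not right1) or sameSubtrees(right1[0], right1[1:], right2[0], right2[1:], root1, maxVal)
--     return leftSame and rightSame
-- ===== Notes on version B (the rewrite author's own statement) =====
-- stated objective: alternative
-- what changed: A recurses on absolute indices into the original arrays, re-scanning index ranges with two first-match index searches per array at every node; B recurses on value lists: it splits the later values into the left ([minVal,root)) and right ([root,maxVal)) subsequences by filtering and recurses on those subsequences, with no index arithmetic at all.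
-- outside the precondition, e.g. on sameBstsHelper([5, 3], [5, 3], -2, 0, -100, 100): A returns False, B returns True
import Mathlib
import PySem

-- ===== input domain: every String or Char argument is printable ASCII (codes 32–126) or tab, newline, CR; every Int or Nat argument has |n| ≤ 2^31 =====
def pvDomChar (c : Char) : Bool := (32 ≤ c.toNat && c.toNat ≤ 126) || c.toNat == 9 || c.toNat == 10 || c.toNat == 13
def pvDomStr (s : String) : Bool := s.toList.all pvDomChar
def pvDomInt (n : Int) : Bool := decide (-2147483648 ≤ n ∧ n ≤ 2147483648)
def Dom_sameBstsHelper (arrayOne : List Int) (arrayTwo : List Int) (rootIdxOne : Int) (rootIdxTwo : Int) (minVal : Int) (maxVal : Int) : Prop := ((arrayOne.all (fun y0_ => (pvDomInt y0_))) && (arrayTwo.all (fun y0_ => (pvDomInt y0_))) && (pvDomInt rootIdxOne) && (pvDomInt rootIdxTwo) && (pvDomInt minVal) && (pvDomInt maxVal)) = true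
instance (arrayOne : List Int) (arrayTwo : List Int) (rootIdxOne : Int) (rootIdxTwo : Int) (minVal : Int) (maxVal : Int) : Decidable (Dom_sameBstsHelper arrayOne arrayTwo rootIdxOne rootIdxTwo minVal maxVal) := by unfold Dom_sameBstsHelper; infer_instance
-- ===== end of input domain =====

-- B drops A's index-based recursion (two first-match index scans per array per node) and
-- instead recurses on value lists: it filters the later values into the left/right subtree
-- subsequences and compares those recursively (objective: alternative).
-- Both ports carry a fuel parameter purely as a totality guard; the recursion depth of the
-- Python programs on admitted inputs is below the fuel supplied.

-- ===== PORT A =====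
-- for i in range(rootIdx+1, len(array)): if array[i] < array[rootIdx] and array[i] >= minVal: return i / return -1
def firstSmallerGo (array : List Int) (rootIdx : Int) (minVal : Int) : List Int → Int
  | [] => -1
  | i :: rest =>
    if PySem.List.pyGetD array i 0 < PySem.List.pyGetD array rootIdx 0 ∧ PySem.List.pyGetD array i 0 ≥ minVal
    then i else firstSmallerGo array rootIdx minVal rest

def getIdxOfFirstSmaller (array : List Int) (rootIdx : Int) (minVal : Int) : Int :=
  firstSmallerGo array rootIdx minVal (PySem.List.pyRange (rootIdx + 1) array.length 1)

-- for i in range(rootIdx+1, len(array)): if array[rootIdx] <= array[i] and array[i] < maxVal: return i / return -1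
def biggerOrEqualGo (array : List Int) (rootIdx : Int) (maxVal : Int) : List Int → Int
  | [] => -1
  | i :: rest =>
    if PySem.List.pyGetD array rootIdx 0 ≤ PySem.List.pyGetD array i 0 ∧ PySem.List.pyGetD array i 0 < maxVal
    then i else biggerOrEqualGo array rootIdx maxVal rest

def getIdxOfBiggerOrEqual (array : List Int) (rootIdx : Int) (maxVal : Int) : Int :=
  biggerOrEqualGo array rootIdx maxVal (PySem.List.pyRange (rootIdx + 1) array.length 1)

def sameBstsFuelA (a1 a2 : List Int) : Nat → Int → Int → Int → Int → Bool
  | 0, _, _, _, _ => false  -- fuel guard only (never reached on admitted inputs)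
  | n + 1, r1, r2, lo, hi =>
    if r1 = -1 ∨ r2 = -1 then decide (r1 = r2)
    else if PySem.List.pyGetD a1 r1 0 ≠ PySem.List.pyGetD a2 r2 0 then false
    else
      let l1 := getIdxOfFirstSmaller a1 r1 lo
      let l2 := getIdxOfFirstSmaller a2 r2 lo
      let rr1 := getIdxOfBiggerOrEqual a1 r1 hi
      let rr2 := getIdxOfBiggerOrEqual a2 r2 hi
      let cur := PySem.List.pyGetD a1 r1 0
      sameBstsFuelA a1 a2 n l1 l2 lo cur && sameBstsFuelA a1 a2 n rr1 rr2 cur hi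

def sameBstsHelper (arrayOne : List Int) (arrayTwo : List Int) (rootIdxOne : Int) (rootIdxTwo : Int) (minVal : Int) (maxVal : Int) : Bool :=
  sameBstsFuelA arrayOne arrayTwo (2 * (arrayOne.length + arrayTwo.length) + 4) rootIdxOne rootIdxTwo minVal maxVal

-- ===== PORT B =====
-- sameSubtrees(root1, rest1, root2, rest2, minVal, maxVal): recursion on the value lists;
-- left/right subtree subsequences obtained by filtering, option-free via isEmpty/headD/tail
def sameSeqFuel : Nat → Int → List Int → Int → List Int → Int → Int → Bool
  | 0, _, _, _, _, _, _ => false  -- fuel guard only (never reached on admitted inputs)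
  | n + 1, root1, rest1, root2, rest2, mn, mx =>
    if root1 ≠ root2 then false
    else
      let left1 := rest1.filter (fun v => decide (mn ≤ v ∧ v < root1))
      let left2 := rest2.filter (fun v => decide (mn ≤ v ∧ v < root2))
      let right1 := rest1.filter (fun v => decide (root1 ≤ v ∧ v < mx))
      let right2 := rest2.filter (fun v => decide (root2 ≤ v ∧ v < mx))
      if left1.isEmpty ≠ left2.isEmpty ∨ right1.isEmpty ≠ right2.isEmpty then false
      else
        let leftSame := left1.isEmpty || sameSeqFuel n (left1.headD 0) left1.tail (left2.headD 0) left2.tail mn root1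
        let rightSame := right1.isEmpty || sameSeqFuel n (right1.headD 0) right1.tail (right2.headD 0) right2.tail root1 mx
        leftSame && rightSame

def sameBstsHelper_alt (arrayOne : List Int) (arrayTwo : List Int) (rootIdxOne : Int) (rootIdxTwo : Int) (minVal : Int) (maxVal : Int) : Bool :=
  if rootIdxOne = -1 ∨ rootIdxTwo = -1 then decide (rootIdxOne = rootIdxTwo)
  else
    sameSeqFuel (2 * (arrayOne.length + arrayTwo.length) + 4)
      (PySem.List.pyGetD arrayOne rootIdxOne 0) (PySem.List.slice arrayOne (some (rootIdxOne + 1)) none)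
      (PySem.List.pyGetD arrayTwo rootIdxTwo 0) (PySem.List.slice arrayTwo (some (rootIdxTwo + 1)) none)
      minVal maxVal

-- ===== PRECONDITION & SPEC =====
-- Pre_ excludes (a) out-of-range root indices other than -1, on which Python A raises
-- IndexError, and (b) negative root indices below -1: -1 is the algorithm's 'absent child'
-- sentinel, other negative indices are outside the function's index convention (A's
-- negative-index wraparound then scans trailing elements twice), so Pre_ restricts to the
-- natural domain {-1} ∪ [0, len).
def Pre_sameBstsHelper (arrayOne : List Int) (arrayTwo : List Int) (rootIdxOne : Int) (rootIdxTwo : Int) (minVal : Int) (maxVal : Int) : Prop :=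
  rootIdxOne = -1 ∨ rootIdxTwo = -1 ∨
    (0 ≤ rootIdxOne ∧ rootIdxOne < arrayOne.length ∧ 0 ≤ rootIdxTwo ∧ rootIdxTwo < arrayTwo.length)
instance (arrayOne : List Int) (arrayTwo : List Int) (rootIdxOne : Int) (rootIdxTwo : Int) (minVal : Int) (maxVal : Int) : Decidable (Pre_sameBstsHelper arrayOne arrayTwo rootIdxOne rootIdxTwo minVal maxVal) := by unfold Pre_sameBstsHelper; infer_instance

def pvWitness_sameBstsHelper : List Int × List Int × Int × Int × Int × Int :=
  ([10, 8, 12], [10, 12, 8], 0, 0, -100, 100)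

def Spec_sameBstsHelper (arrayOne : List Int) (arrayTwo : List Int) (rootIdxOne : Int) (rootIdxTwo : Int) (minVal : Int) (maxVal : Int) (out : Bool) : Prop := out = sameBstsHelper_alt arrayOne arrayTwo rootIdxOne rootIdxTwo minVal maxVal
instance (arrayOne : List Int) (arrayTwo : List Int) (rootIdxOne : Int) (rootIdxTwo : Int) (minVal : Int) (maxVal : Int) (out : Bool) : Decidable (Spec_sameBstsHelper arrayOne arrayTwo rootIdxOne rootIdxTwo minVal maxVal out) := by unfold Spec_sameBstsHelper; infer_instance

-- ===== CLAIM (what is proved, stated in full; the proofs are below) =====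
def Claim_equal_sameBstsHelper : Prop := ∀ (arrayOne : List Int) (arrayTwo : List Int) (rootIdxOne : Int) (rootIdxTwo : Int) (minVal : Int) (maxVal : Int), Dom_sameBstsHelper arrayOne arrayTwo rootIdxOne rootIdxTwo minVal maxVal → Pre_sameBstsHelper arrayOne arrayTwo rootIdxOne rootIdxTwo minVal maxVal → Spec_sameBstsHelper arrayOne arrayTwo rootIdxOne rootIdxTwo minVal maxVal (sameBstsHelper arrayOne arrayTwo rootIdxOne rootIdxTwo minVal maxVal)

-- ===== LEMMAS AND PROOFS =====

-- generic first-match scan: both of A's index searches are instances of it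
def scanGo (a : List Int) (p : Int → Bool) : List Int → Int
  | [] => -1
  | i :: rest => if p (PySem.List.pyGetD a i 0) then i else scanGo a p rest

lemma firstSmallerGo_eq_scanGo (a : List Int) (r mn : Int) (is : List Int) :
    firstSmallerGo a r mn is
      = scanGo a (fun v => decide (mn ≤ v ∧ v < PySem.List.pyGetD a r 0)) is := by
  induction is with
  | nil => rfl
  | cons i rest ih =>
    simp only [firstSmallerGo, scanGo, ih]
    by_cases h : mn ≤ PySem.List.pyGetD a i 0 ∧ PySem.List.pyGetD a i 0 < PySem.List.pyGetD a r 0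
    · rw [if_pos ⟨h.2, h.1⟩, if_pos (by simpa using h)]
    · rw [if_neg (fun hc => h ⟨hc.2, hc.1⟩), if_neg (by simpa using h)]

lemma biggerOrEqualGo_eq_scanGo (a : List Int) (r mx : Int) (is : List Int) :
    biggerOrEqualGo a r mx is
      = scanGo a (fun v => decide (PySem.List.pyGetD a r 0 ≤ v ∧ v < mx)) is := by
  induction is with
  | nil => rfl
  | cons i rest ih =>
    simp only [biggerOrEqualGo, scanGo, ih]
    by_cases h : PySem.List.pyGetD a r 0 ≤ PySem.List.pyGetD a i 0 ∧ PySem.List.pyGetD a i 0 < mx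
    · rw [if_pos h, if_pos (by simpa using h)]
    · rw [if_neg h, if_neg (by simpa using h)]

-- the scan over range(j, len) against the filter of drop j: either no match and the filter
-- is empty, or the scan returns the index of the filter's head and the filter's tail is the
-- filter of the remaining suffix
lemma scanGo_spec (a : List Int) (p : Int → Bool) :
    ∀ (j : Nat),
      (scanGo a p (PySem.List.pyRange (j : Int) a.length 1) = -1 ∧ (a.drop j).filter p = []) ∨
      (∃ k : Nat, j ≤ k ∧ k < a.length ∧
        scanGo a p (PySem.List.pyRange (j : Int) a.length 1) = (k : Int) ∧
        p (a.getD k 0) = true ∧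
        (a.drop j).filter p = a.getD k 0 :: (a.drop (k + 1)).filter p) := by
  intro j
  by_cases hj : j < a.length
  case neg =>
    left
    constructor
    · rw [PySem.List.pyRange_one_eq_nil (by omega)]; rfl
    · rw [List.drop_eq_nil_of_le (by omega)]; rfl
  case pos =>
    induction hlen : a.length - j generalizing j with
    | zero => omega
    | succ m ih =>
      rw [PySem.List.pyRange_one_cons (by omega)]
      have hdrop : a.drop j = a[j] :: a.drop (j + 1) := List.drop_eq_getElem_cons hj
      have hget : PySem.List.pyGetD a (j : Int) 0 = a.getD j 0 := by
        simp [PySem.List.pyGetD_natCast]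
      have hgetD : a.getD j 0 = a[j] := List.getD_eq_getElem a 0 hj
      by_cases hp : p a[j] = true
      · right
        refine ⟨j, le_refl j, hj, ?_, by rw [hgetD]; exact hp, ?_⟩
        · simp only [scanGo, hget, hgetD, hp, if_true]
        · rw [hdrop, List.filter_cons, hp, hgetD]; simp
      · have hscan : scanGo a p ((j : Int) :: PySem.List.pyRange ((j : Int) + 1) a.length 1)
            = scanGo a p (PySem.List.pyRange ((j : Int) + 1) a.length 1) := by
          simp [scanGo, hget, List.getElem?_eq_getElem hj, hp]
        have hfil : (a.drop j).filter p = (a.drop (j + 1)).filter p := by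
          rw [hdrop, List.filter_cons]; simp [hp]
        have hcast : ((j : Int) + 1) = ((j + 1 : Nat) : Int) := by push_cast; ring
        by_cases hj1 : j + 1 < a.length
        · rcases ih (j + 1) hj1 (by omega) with ⟨h1, h2⟩ | ⟨k, hk1, hk2, hk3, hk4, hk5⟩
          · left; rw [hscan, hcast, hfil]; exact ⟨h1, h2⟩
          · right; exact ⟨k, by omega, hk2, by rw [hscan, hcast]; exact hk3, hk4, by rw [hfil]; exact hk5⟩
        · left
          constructor
          · rw [hscan, PySem.List.pyRange_one_eq_nil (by omega)]; rfl
          · rw [hfil, List.drop_eq_nil_of_le (by omega)]; rfl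


lemma filter_filter_sub (l : List Int) (p q : Int → Bool) (h : ∀ x, q x = true → p x = true) :
    (l.filter p).filter q = l.filter q := by
  induction l with
  | nil => rfl
  | cons a l ih =>
    by_cases hq : q a = true
    · have hp := h a hq
      simp [hp, hq, ih]
    · rcases hp : p a <;> simp [hp, hq, ih]

-- the recursion only looks at its rest-lists through the two filters, so replacing a
-- rest-list by any list with the same two filters leaves the result unchanged
lemma sameSeqFuel_filter_congr (n : Nat) (root1 root2 mn mx : Int) (s1 t1 s2 t2 : List Int)
    (h1 : s1.filter (fun v => decide (mn ≤ v ∧ v < root1)) = t1.filter (fun v => decide (mn ≤ v ∧ v < root1)))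
    (h2 : s1.filter (fun v => decide (root1 ≤ v ∧ v < mx)) = t1.filter (fun v => decide (root1 ≤ v ∧ v < mx)))
    (h3 : s2.filter (fun v => decide (mn ≤ v ∧ v < root2)) = t2.filter (fun v => decide (mn ≤ v ∧ v < root2)))
    (h4 : s2.filter (fun v => decide (root2 ≤ v ∧ v < mx)) = t2.filter (fun v => decide (root2 ≤ v ∧ v < mx))) :
    sameSeqFuel n root1 s1 root2 s2 mn mx = sameSeqFuel n root1 t1 root2 t2 mn mx := by
  cases n with
  | zero => rfl
  | succ n => simp only [sameSeqFuel, h1, h2, h3, h4]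

-- main correspondence: A's index recursion at an in-range node equals B's list recursion on
-- the (unfiltered) suffixes, with the same fuel, once the fuel exceeds A's recursion depth
lemma fuelA_eq_seq (a1 a2 : List Int) :
    ∀ (n : Nat) (k1 k2 : Nat) (mn mx : Int), k1 < a1.length → k2 < a2.length →
      a1.length - k1 < n →
      sameBstsFuelA a1 a2 n (k1 : Int) (k2 : Int) mn mx
        = sameSeqFuel n (a1.getD k1 0) (a1.drop (k1 + 1)) (a2.getD k2 0) (a2.drop (k2 + 1)) mn mx := by
  intro n
  induction n with
  | zero => intro k1 k2 mn mx h1 h2 hn; omega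
  | succ n ih =>
    intro k1 k2 mn mx h1 h2 hn
    have hn1 : 1 ≤ n + 1 := by omega
    have hn2 : 1 ≤ n := by omega
    obtain ⟨n', rfl⟩ : ∃ n', n = n' + 1 := ⟨n - 1, (Nat.succ_pred_eq_of_pos hn2).symm⟩
    have hget1 : PySem.List.pyGetD a1 (k1 : Int) 0 = a1.getD k1 0 := by
      simp [PySem.List.pyGetD_natCast]
    have hget2 : PySem.List.pyGetD a2 (k2 : Int) 0 = a2.getD k2 0 := by
      simp [PySem.List.pyGetD_natCast]
    rw [sameBstsFuelA, sameSeqFuel]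
    rw [if_neg (by omega : ¬((k1 : Int) = -1 ∨ (k2 : Int) = -1))]
    rw [hget1, hget2]
    by_cases hroot : a1.getD k1 0 = a2.getD k2 0
    case neg =>
      rw [if_pos hroot, if_pos (by exact hroot)]
    case pos =>
      rw [if_neg (not_not_intro hroot), if_neg (not_not_intro hroot)]
      -- names for the two predicates per array
      have hcast1 : ((k1 : Int) + 1) = ((k1 + 1 : Nat) : Int) := by push_cast; ring
      have hcast2 : ((k2 : Int) + 1) = ((k2 + 1 : Nat) : Int) := by push_cast; ring
      have hL1 := scanGo_spec a1 (fun v => decide (mn ≤ v ∧ v < a1.getD k1 0)) (k1 + 1)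
      have hL2 := scanGo_spec a2 (fun v => decide (mn ≤ v ∧ v < a2.getD k2 0)) (k2 + 1)
      have hR1 := scanGo_spec a1 (fun v => decide (a1.getD k1 0 ≤ v ∧ v < mx)) (k1 + 1)
      have hR2 := scanGo_spec a2 (fun v => decide (a2.getD k2 0 ≤ v ∧ v < mx)) (k2 + 1)
      have hsc1 : getIdxOfFirstSmaller a1 (k1 : Int) mn
          = scanGo a1 (fun v => decide (mn ≤ v ∧ v < a1.getD k1 0)) (PySem.List.pyRange ((k1 + 1 : Nat) : Int) a1.length 1) := by
        rw [getIdxOfFirstSmaller, firstSmallerGo_eq_scanGo, hget1, hcast1]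
      have hsc2 : getIdxOfFirstSmaller a2 (k2 : Int) mn
          = scanGo a2 (fun v => decide (mn ≤ v ∧ v < a2.getD k2 0)) (PySem.List.pyRange ((k2 + 1 : Nat) : Int) a2.length 1) := by
        rw [getIdxOfFirstSmaller, firstSmallerGo_eq_scanGo, hget2, hcast2]
      have hsc3 : getIdxOfBiggerOrEqual a1 (k1 : Int) mx
          = scanGo a1 (fun v => decide (a1.getD k1 0 ≤ v ∧ v < mx)) (PySem.List.pyRange ((k1 + 1 : Nat) : Int) a1.length 1) := by
        rw [getIdxOfBiggerOrEqual, biggerOrEqualGo_eq_scanGo, hget1, hcast1]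
      have hsc4 : getIdxOfBiggerOrEqual a2 (k2 : Int) mx
          = scanGo a2 (fun v => decide (a2.getD k2 0 ≤ v ∧ v < mx)) (PySem.List.pyRange ((k2 + 1 : Nat) : Int) a2.length 1) := by
        rw [getIdxOfBiggerOrEqual, biggerOrEqualGo_eq_scanGo, hget2, hcast2]
      simp only [hsc1, hsc2, hsc3, hsc4]
      set root := a1.getD k1 0 with hrootdef
      set scanL1 := scanGo a1 (fun v => decide (mn ≤ v ∧ v < a1.getD k1 0)) (PySem.List.pyRange ((k1 + 1 : Nat) : Int) a1.length 1) with hsL1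
      set scanL2 := scanGo a2 (fun v => decide (mn ≤ v ∧ v < a2.getD k2 0)) (PySem.List.pyRange ((k2 + 1 : Nat) : Int) a2.length 1) with hsL2
      set scanR1 := scanGo a1 (fun v => decide (a1.getD k1 0 ≤ v ∧ v < mx)) (PySem.List.pyRange ((k1 + 1 : Nat) : Int) a1.length 1) with hsR1
      set scanR2 := scanGo a2 (fun v => decide (a2.getD k2 0 ≤ v ∧ v < mx)) (PySem.List.pyRange ((k2 + 1 : Nat) : Int) a2.length 1) with hsR2
      set Lf1 := (a1.drop (k1 + 1)).filter (fun v => decide (mn ≤ v ∧ v < a1.getD k1 0)) with hLf1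
      set Lf2 := (a2.drop (k2 + 1)).filter (fun v => decide (mn ≤ v ∧ v < a2.getD k2 0)) with hLf2
      set Rf1 := (a1.drop (k1 + 1)).filter (fun v => decide (a1.getD k1 0 ≤ v ∧ v < mx)) with hRf1
      set Rf2 := (a2.drop (k2 + 1)).filter (fun v => decide (a2.getD k2 0 ≤ v ∧ v < mx)) with hRf2
      have leftRes :
          (Lf1.isEmpty = Lf2.isEmpty ∧
            sameBstsFuelA a1 a2 (n' + 1) scanL1 scanL2 mn root
              = (Lf1.isEmpty || sameSeqFuel (n' + 1) (Lf1.headD 0) Lf1.tail (Lf2.headD 0) Lf2.tail mn root))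
        ∨ (Lf1.isEmpty ≠ Lf2.isEmpty ∧
            sameBstsFuelA a1 a2 (n' + 1) scanL1 scanL2 mn root = false) := by
        clear hR1 hR2
        rcases hL1 with ⟨he1, hf1⟩ | ⟨j1, hj1a, hj1b, he1, hp1, hf1⟩ <;>
          rcases hL2 with ⟨he2, hf2⟩ | ⟨j2, hj2a, hj2b, he2, hp2, hf2⟩
        · left
          rw [hf1, hf2, he1, he2]
          constructor
          · rfl
          · simp [sameBstsFuelA]
        · right
          rw [hf1, hf2, he1, he2]
          refine ⟨by simp, ?_⟩
          simp [sameBstsFuelA]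
        · right
          rw [hf1, hf2, he1, he2]
          refine ⟨by simp, ?_⟩
          simp [sameBstsFuelA]
        · left
          rw [hf1, hf2, he1, he2]
          refine ⟨by simp, ?_⟩
          simp only [List.isEmpty_cons, Bool.false_or, List.headD_cons, List.tail_cons]
          rw [ih j1 j2 mn root hj1b hj2b (by omega)]
          simp only [decide_eq_true_eq] at hp1 hp2
          refine (sameSeqFuel_filter_congr _ _ _ _ _ _ _ _ _ ?_ ?_ ?_ ?_).symm <;>
            refine filter_filter_sub _ _ _ (fun x hx => ?_) <;>
              (simp only [decide_eq_true_eq] at hx ⊢; omega)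
      have rightRes :
          (Rf1.isEmpty = Rf2.isEmpty ∧
            sameBstsFuelA a1 a2 (n' + 1) scanR1 scanR2 root mx
              = (Rf1.isEmpty || sameSeqFuel (n' + 1) (Rf1.headD 0) Rf1.tail (Rf2.headD 0) Rf2.tail root mx))
        ∨ (Rf1.isEmpty ≠ Rf2.isEmpty ∧
            sameBstsFuelA a1 a2 (n' + 1) scanR1 scanR2 root mx = false) := by
        clear hL1 hL2
        rcases hR1 with ⟨he1, hf1⟩ | ⟨j1, hj1a, hj1b, he1, hp1, hf1⟩ <;>
          rcases hR2 with ⟨he2, hf2⟩ | ⟨j2, hj2a, hj2b, he2, hp2, hf2⟩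
        · left
          rw [hf1, hf2, he1, he2]
          constructor
          · rfl
          · simp [sameBstsFuelA]
        · right
          rw [hf1, hf2, he1, he2]
          refine ⟨by simp, ?_⟩
          simp [sameBstsFuelA]
        · right
          rw [hf1, hf2, he1, he2]
          refine ⟨by simp, ?_⟩
          simp [sameBstsFuelA]
        · left
          rw [hf1, hf2, he1, he2]
          refine ⟨by simp, ?_⟩
          simp only [List.isEmpty_cons, Bool.false_or, List.headD_cons, List.tail_cons]
          rw [ih j1 j2 root mx hj1b hj2b (by omega)]
          simp only [decide_eq_true_eq] at hp1 hp2
          refine (sameSeqFuel_filter_congr _ _ _ _ _ _ _ _ _ ?_ ?_ ?_ ?_).symm <;>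
            refine filter_filter_sub _ _ _ (fun x hx => ?_) <;>
              (simp only [decide_eq_true_eq] at hx ⊢; omega)
      rcases leftRes with ⟨hle, hlv⟩ | ⟨hle, hlv⟩ <;> rcases rightRes with ⟨hre, hrv⟩ | ⟨hre, hrv⟩
      · rw [if_neg (by simp [hle, hre]), hlv, hrv]
      · rw [if_pos (Or.inr hre), hrv, Bool.and_false]
      · rw [if_pos (Or.inl hle), hlv, Bool.false_and]
      · rw [if_pos (Or.inl hle), hlv, Bool.false_and]

-- ===== VERDICT (by name: the statement is the Claim_ definition above) =====
theorem sameBstsHelper_spec : Claim_equal_sameBstsHelper := by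
  intro a1 a2 r1 r2 mn mx _ hpre
  unfold Spec_sameBstsHelper sameBstsHelper sameBstsHelper_alt
  have hsplit : 2 * (a1.length + a2.length) + 4 = (2 * (a1.length + a2.length) + 3) + 1 := by omega
  by_cases hs : r1 = -1 ∨ r2 = -1
  · rw [if_pos hs, hsplit, sameBstsFuelA, if_pos hs]
  · rw [if_neg hs]
    have hnat : 0 ≤ r1 ∧ r1 < a1.length ∧ 0 ≤ r2 ∧ r2 < a2.length := by
      rcases hpre with h | h | h
      · exact absurd (Or.inl h) hs
      · exact absurd (Or.inr h) hs
      · exact ⟨h.1, h.2.1, h.2.2.1, h.2.2.2⟩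
    obtain ⟨h1a, h1b, h2a, h2b⟩ := hnat
    obtain ⟨k1, rfl⟩ : ∃ k : Nat, r1 = (k : Int) := ⟨r1.toNat, (Int.toNat_of_nonneg h1a).symm⟩
    obtain ⟨k2, rfl⟩ : ∃ k : Nat, r2 = (k : Int) := ⟨r2.toNat, (Int.toNat_of_nonneg h2a).symm⟩
    have hb1 : k1 < a1.length := by omega
    have hb2 : k2 < a2.length := by omega
    have hsl1 : PySem.List.slice a1 (some ((k1 : Int) + 1)) none = a1.drop (k1 + 1) := by
      rw [show ((k1 : Int) + 1) = ((k1 + 1 : Nat) : Int) by push_cast; ring,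
        PySem.List.slice_from_natCast]
    have hsl2 : PySem.List.slice a2 (some ((k2 : Int) + 1)) none = a2.drop (k2 + 1) := by
      rw [show ((k2 : Int) + 1) = ((k2 + 1 : Nat) : Int) by push_cast; ring,
        PySem.List.slice_from_natCast]
    rw [hsl1, hsl2, PySem.List.pyGetD_natCast, PySem.List.pyGetD_natCast]
    exact fuelA_eq_seq a1 a2 _ k1 k2 mn mx hb1 hb2 (by omega)
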